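-- pv_equiv track=rewrite | github.com/Hyun010/algorithm | 프로그래머스/0/120843. 공 던지기/공 던지기.py | solution
-- ===== SOURCE A (Python) =====
-- def solution(numbers, k):
--     answer = 0
--     i=0
--     cnt=0
--     while cnt<k:
--         answer=numbers[i%len(numbers)]
--         cnt+=1
--         i+=2
--     return answer
-- ===== SOURCE B (Python) =====
-- def solution(numbers, k):
--     # Closed form: the answer after k passes of step 2 is numbers[(2*(k-1)) % len(numbers)].
--     if k <= 0:
--         return 0
--     return numbers[(2 * (k - 1)) % len(numbers)]
-- ===== Notes on version B (the rewrite author's own statement) =====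
-- stated objective: faster
-- what changed: Replaces the O(k) while-loop with the closed-form index numbers[(2*(k-1)) % len(numbers)].
import Mathlib
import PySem

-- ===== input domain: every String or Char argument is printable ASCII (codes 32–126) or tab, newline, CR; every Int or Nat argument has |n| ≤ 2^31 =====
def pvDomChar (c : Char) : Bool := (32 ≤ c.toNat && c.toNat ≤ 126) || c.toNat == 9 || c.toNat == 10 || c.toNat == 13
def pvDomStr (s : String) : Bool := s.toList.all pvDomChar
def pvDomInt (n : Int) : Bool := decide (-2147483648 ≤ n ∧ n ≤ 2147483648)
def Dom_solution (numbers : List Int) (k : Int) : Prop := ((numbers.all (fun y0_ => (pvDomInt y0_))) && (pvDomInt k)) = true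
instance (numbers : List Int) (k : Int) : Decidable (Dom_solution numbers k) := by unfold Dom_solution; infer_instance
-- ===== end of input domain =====

-- B replaces A's O(k) stepping loop with the closed-form index (2*(k-1)) % len(numbers) (faster, asymptotic in a timing run).


-- ===== PORT A =====
-- the while loop: fuel = remaining iterations (k - cnt); answer, i are the loop state.
-- numbers[i % len] is ported via pyGet?; '.getD 0' is only reached when numbers = [] (excluded by Pre_).
def solLoopA (numbers : List Int) (answer i : Int) : Nat → Int
  | 0 => answer
  | Nat.succ f =>
      solLoopA numbers ((PySem.List.pyGet? numbers (PySem.Int.mod i numbers.length)).getD 0) (i + 2) f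

def solution (numbers : List Int) (k : Int) : Int :=
  solLoopA numbers 0 0 k.toNat

-- ===== PORT B =====
def solution_alt (numbers : List Int) (k : Int) : Int :=
  if k ≤ 0 then 0
  else (PySem.List.pyGet? numbers (PySem.Int.mod (2 * (k - 1)) numbers.length)).getD 0

-- ===== PRECONDITION & SPEC =====
-- Pre_ excludes only the crash: with numbers = [] and k > 0 both Pythons raise (ZeroDivisionError on % 0).
def Pre_solution (numbers : List Int) (k : Int) : Prop := numbers ≠ [] ∨ k ≤ 0
instance (numbers : List Int) (k : Int) : Decidable (Pre_solution numbers k) := by unfold Pre_solution; infer_instance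
def pvWitness_solution : List Int × Int := ([1, 2, 3, 4], 5)
def Spec_solution (numbers : List Int) (k : Int) (out : Int) : Prop := out = solution_alt numbers k
instance (numbers : List Int) (k : Int) (out : Int) : Decidable (Spec_solution numbers k out) := by unfold Spec_solution; infer_instance

-- ===== CLAIM (what is proved, stated in full; the proofs are below) =====
def Claim_equal_solution : Prop := ∀ (numbers : List Int) (k : Int), Dom_solution numbers k → Pre_solution numbers k → Spec_solution numbers k (solution numbers k)

-- ===== LEMMAS AND PROOFS =====
-- loop characterisation: one-or-more iterations from state (answer, i) end at index (i + 2*f) % len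
theorem solLoopA_closed (numbers : List Int) (f : Nat) :
    ∀ (answer i : Int),
      solLoopA numbers answer i (f + 1)
        = (PySem.List.pyGet? numbers (PySem.Int.mod (i + 2 * f) numbers.length)).getD 0 := by
  induction f with
  | zero => intro answer i; simp [solLoopA]
  | succ f ih =>
      intro answer i
      rw [show f + 1 + 1 = (f + 1) + 1 from rfl, solLoopA, ih]
      congr 2
      push_cast
      ring_nf

-- ===== VERDICT (by name: the statement is the Claim_ definition above) =====
theorem solution_spec : Claim_equal_solution := by
  intro numbers k _ _
  unfold Spec_solution solution solution_alt
  by_cases hk : k ≤ 0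
  · have : k.toNat = 0 := by omega
    simp [this, solLoopA, hk]
  · have hk' : 0 < k := by omega
    have h1 : k.toNat = (k.toNat - 1) + 1 := by omega
    rw [h1, solLoopA_closed]
    have h2 : (0 : Int) + 2 * ((k.toNat - 1 : Nat) : Int) = 2 * (k - 1) := by
      omega
    rw [h2]
    simp [hk]
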